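-- pv_equiv track=rewrite | github.com/p4z1/NN-anomaly-detection-system | sonda/imageTransformation.py | _decToBinSplit16b
-- ===== SOURCE A (Python) =====
-- def _decToBinSplit16b(value):
--     if value < 0:
--         value = 0
--     elif value > 65535:
--         value = 65535
--
--     binnary = bin(value)[2:]
--     while len(binnary) < 16:
--         binnary = "0" + binnary
--
--     return [int("0b"+binnary[:8],2),int("0b"+binnary[8:16],2)]
-- ===== SOURCE B (Python) =====
-- def _decToBinSplit16b(value):
--     if value < 0:
--         value = 0
--     elif value > 65535:
--         value = 65535
--     high, low = divmod(value, 256)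
--     return [high, low]
-- ===== Notes on version B (the rewrite author's own statement) =====
-- stated objective: idiomatic
-- what changed: Replaces the bin()-string build, zero-padding while-loop, slicing and int(...,2) re-parsing with a single integer divmod(value, 256) after the same clamp.
import Mathlib
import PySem

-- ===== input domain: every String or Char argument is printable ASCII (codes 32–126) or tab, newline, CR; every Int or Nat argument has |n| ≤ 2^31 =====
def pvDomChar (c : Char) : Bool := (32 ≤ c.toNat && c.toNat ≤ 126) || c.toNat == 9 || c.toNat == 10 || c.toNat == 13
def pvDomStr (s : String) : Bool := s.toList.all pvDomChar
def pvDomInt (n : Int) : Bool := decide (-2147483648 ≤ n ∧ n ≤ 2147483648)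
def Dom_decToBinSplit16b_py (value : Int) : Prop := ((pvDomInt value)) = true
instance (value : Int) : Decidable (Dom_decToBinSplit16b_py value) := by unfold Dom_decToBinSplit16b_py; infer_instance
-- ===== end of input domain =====

-- B replaces A's bin()-string build / zero-pad loop / slice / int(...,2) re-parse with one divmod after the same clamp (idiomatic).

-- ===== PORT A =====
-- binary digits of a nonnegative n, as Python's bin(n)[2:] produces them for n > 0 (exact for Nat)
def pvBinChars (n : Nat) : List Char :=
  if h : n = 0 then [] else pvBinChars (n / 2) ++ [if n % 2 = 1 then '1' else '0']
decreasing_by exact Nat.div_lt_self (Nat.pos_of_ne_zero h) (by norm_num)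

-- bin(n)[2:] for n ≥ 0 (Python prints "0" for 0)
def pvBin (n : Nat) : List Char := if n = 0 then ['0'] else pvBinChars n

-- the while-loop: prepend '0' until the length is ≥ 16
def pvPad (l : List Char) : List Char :=
  if h : l.length < 16 then pvPad ('0' :: l) else l
decreasing_by simp; omega

-- int("0b" + s, 2) for a string of '0'/'1' chars (exact on that domain, which is all A feeds it)
def pvParseBin (l : List Char) : Nat :=
  l.foldl (fun a c => 2 * a + (if c = '1' then 1 else 0)) 0

def decToBinSplit16b_py (value : Int) : List Int :=
  let v : Int := if value < 0 then 0 else if value > 65535 then 65535 else value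
  -- v ≥ 0 here, so bin(v) has no '-' sign and v.toNat = v
  let binnary := pvPad (pvBin v.toNat)
  [(pvParseBin (binnary.take 8) : Int), (pvParseBin ((binnary.drop 8).take 8) : Int)]

-- ===== PORT B =====
def decToBinSplit16b_py_alt (value : Int) : List Int :=
  let v : Int := if value < 0 then 0 else if value > 65535 then 65535 else value
  [PySem.Int.floordiv v 256, PySem.Int.mod v 256]

-- ===== PRECONDITION & SPEC =====
def Spec_decToBinSplit16b_py (value : Int) (out : List Int) : Prop := out = decToBinSplit16b_py_alt value
instance (value : Int) (out : List Int) : Decidable (Spec_decToBinSplit16b_py value out) := by unfold Spec_decToBinSplit16b_py; infer_instance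

-- ===== CLAIM (what is proved, stated in full; the proofs are below) =====
def Claim_equal_decToBinSplit16b_py : Prop := ∀ (value : Int), Dom_decToBinSplit16b_py value → Spec_decToBinSplit16b_py value (decToBinSplit16b_py value)

-- ===== LEMMAS AND PROOFS =====

theorem pvParseBin_append (a b : List Char) :
    pvParseBin (a ++ b) = pvParseBin a * 2 ^ b.length + pvParseBin b := by
  have key : ∀ (l : List Char) (init : Nat),
      l.foldl (fun a c => 2 * a + (if c = '1' then 1 else 0)) init
        = init * 2 ^ l.length + pvParseBin l := by
    intro l
    induction l with
    | nil => intro init; simp [pvParseBin]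
    | cons c t ih =>
      intro init
      simp only [List.foldl_cons, List.length_cons, pvParseBin]
      rw [ih, ih (2 * 0 + (if c = '1' then 1 else 0))]
      ring
  unfold pvParseBin
  rw [List.foldl_append, key b]
  rfl

theorem pvParseBin_pvBinChars (n : Nat) : pvParseBin (pvBinChars n) = n := by
  induction n using Nat.strong_induction_on with
  | _ n ih =>
    rw [pvBinChars]
    by_cases h : n = 0
    · simp [h, pvParseBin]
    · simp only [h, dite_false]
      rw [pvParseBin_append, ih (n / 2) (Nat.div_lt_self (Nat.pos_of_ne_zero h) (by norm_num))]
      by_cases h2 : n % 2 = 1 <;> simp [h2, pvParseBin] <;> omega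

theorem pvParseBin_pvBin (n : Nat) : pvParseBin (pvBin n) = n := by
  unfold pvBin
  by_cases h : n = 0
  · simp [h, pvParseBin]
  · simp [h, pvParseBin_pvBinChars]

-- every character produced/kept is a bit
def pvBits (l : List Char) : Prop := ∀ c ∈ l, c = '0' ∨ c = '1'

theorem pvBits_pvBinChars (n : Nat) : pvBits (pvBinChars n) := by
  induction n using Nat.strong_induction_on with
  | _ n ih =>
    rw [pvBinChars]
    by_cases h : n = 0
    · simp [h, pvBits]
    · simp only [h, dite_false]
      intro c hc
      rcases List.mem_append.mp hc with hc | hc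
      · exact ih (n / 2) (Nat.div_lt_self (Nat.pos_of_ne_zero h) (by norm_num)) c hc
      · simp at hc; subst hc; by_cases h2 : n % 2 = 1 <;> simp [h2]

theorem pvBits_pvBin (n : Nat) : pvBits (pvBin n) := by
  unfold pvBin
  by_cases h : n = 0
  · simp [h, pvBits]
  · simpa [h] using pvBits_pvBinChars n

theorem pvParseBin_lt (l : List Char) (h : pvBits l) : pvParseBin l < 2 ^ l.length := by
  induction l with
  | nil => simp [pvParseBin]
  | cons c t ih =>
    have := ih (fun x hx => h x (List.mem_cons_of_mem _ hx))
    have hc := h c List.mem_cons_self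
    have step : pvParseBin (c :: t)
        = (if c = '1' then 1 else 0) * 2 ^ t.length + pvParseBin t := by
      have := pvParseBin_append [c] t
      simpa [pvParseBin] using this
    rw [step]
    rcases hc with hc | hc <;> simp [hc, List.length_cons, pow_succ] <;> omega
-- pvPad: value, bits, and length facts
theorem pvPad_spec (l : List Char) (hb : pvBits l) :
    pvParseBin (pvPad l) = pvParseBin l ∧ pvBits (pvPad l) ∧ 16 ≤ (pvPad l).length ∧
      ((pvPad l).length = 16 ∨ pvPad l = l) := by
  by_cases h : l.length < 16
  · have hb' : pvBits ('0' :: l) := by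
      intro c hc
      rcases List.mem_cons.mp hc with hc | hc
      · left; exact hc
      · exact hb c hc
    have ih := pvPad_spec ('0' :: l) hb'
    rw [pvPad, dif_pos h]
    refine ⟨?_, ih.2.1, ih.2.2.1, ?_⟩
    · rw [ih.1]
      have := pvParseBin_append ['0'] l
      simpa [pvParseBin] using this
    · rcases ih.2.2.2 with h16 | heq
      · exact Or.inl h16
      · have h16 := ih.2.2.1
        rw [heq] at h16
        left; rw [heq]; simp at h16 ⊢; omega
  · rw [pvPad, dif_neg h]
    exact ⟨rfl, hb, by omega, Or.inr rfl⟩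
termination_by 16 - l.length
decreasing_by simp; omega

-- length of bin(n)[2:] is ≤ 16 for n ≤ 65535
theorem pvBinChars_length_le (n k : Nat) (h : n < 2 ^ k) : (pvBinChars n).length ≤ k := by
  induction k generalizing n with
  | zero => interval_cases n; simp [pvBinChars]
  | succ k ih =>
    rw [pvBinChars]
    by_cases h0 : n = 0
    · simp [h0]
    · simp only [h0, dite_false, List.length_append, List.length_cons, List.length_nil]
      have hk : n / 2 < 2 ^ k := by
        have : n < 2 * 2 ^ k := by rw [pow_succ] at h; omega
        omega
      have := ih (n / 2) hk
      omega

theorem pvBin_length_le (n : Nat) (h : n ≤ 65535) : (pvBin n).length ≤ 16 := by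
  unfold pvBin
  by_cases h0 : n = 0
  · simp [h0]
  · simp only [h0, if_false]
    exact pvBinChars_length_le n 16 (by omega)

-- the core: A's two parsed halves are n / 256 and n % 256
theorem pvSplit (n : Nat) (hn : n ≤ 65535) :
    let p := pvPad (pvBin n)
    pvParseBin (p.take 8) = n / 256 ∧ pvParseBin ((p.drop 8).take 8) = n % 256 := by
  intro p
  obtain ⟨hval, hbits, hlen16, hlen⟩ := pvPad_spec (pvBin n) (pvBits_pvBin n)
  have hplen : p.length = 16 := by
    rcases hlen with h | h
    · exact h
    · have hb := pvBin_length_le n hn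
      show (pvPad (pvBin n)).length = 16
      rw [h] at hlen16 ⊢
      omega
  have hsplit : p.take 8 ++ p.drop 8 = p := List.take_append_drop 8 p
  have hdlen : (p.drop 8).length = 8 := by simp [hplen]
  have hdtake : (p.drop 8).take 8 = p.drop 8 := by
    rw [List.take_of_length_le]; omega
  have hv : pvParseBin (p.take 8) * 2 ^ 8 + pvParseBin (p.drop 8) = n := by
    have := pvParseBin_append (p.take 8) (p.drop 8)
    rw [hsplit, hdlen] at this
    rw [← this, hval, pvParseBin_pvBin]
  have hdb : pvBits (p.drop 8) := fun c hc => hbits c (List.mem_of_mem_drop hc)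
  have hdlt : pvParseBin (p.drop 8) < 2 ^ 8 := by
    have := pvParseBin_lt (p.drop 8) hdb
    rwa [hdlen] at this
  rw [hdtake]
  norm_num at hv hdlt ⊢
  omega

-- ===== VERDICT (by name: the statement is the Claim_ definition above) =====
theorem decToBinSplit16b_py_spec : Claim_equal_decToBinSplit16b_py := by
  intro value _
  unfold Spec_decToBinSplit16b_py decToBinSplit16b_py decToBinSplit16b_py_alt
  set v : Int := if value < 0 then 0 else if value > 65535 then 65535 else value with hv
  have hv0 : 0 ≤ v ∧ v ≤ 65535 := by
    rw [hv]; split_ifs <;> omega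
  obtain ⟨m, hm, hle⟩ : ∃ m : Nat, v = (m : Int) ∧ m ≤ 65535 := ⟨v.toNat, by omega, by omega⟩
  rw [hm]
  obtain ⟨h1, h2⟩ := pvSplit m hle
  simp only [Int.toNat_natCast]
  rw [PySem.Int.floordiv_eq_ediv_of_pos (by norm_num), PySem.Int.mod_eq_emod_of_pos (by norm_num)]
  have hd : ((m : Int)) / 256 = ((m / 256 : Nat) : Int) := by omega
  have hr : ((m : Int)) % 256 = ((m % 256 : Nat) : Int) := by omega
  simp only [h1, h2, hd, hr]
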